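-- pv_equiv track=rewrite | github.com/iamvinit/stego | triencryptbits1.py | generateBlockValues
-- ===== SOURCE A (Python) =====
-- def generateBlockValues(data, key):
-- 	blockvalues = [0]*len(key)
-- 	ptbyte = 0
-- 	ptbit = 8
-- 	for i in range(len(key)):
--
-- 		blockConfig = key[i]
-- 		sizeOfBlock = blockConfig >> 2
-- 		while sizeOfBlock > 0:
-- 			if ptbit == 0:
-- 				ptbit = 8
-- 				ptbyte = ptbyte + 1
-- 			if ptbit == 8 and sizeOfBlock > 8:
-- 				take = 8
-- 				blockvalues[i] = (blockvalues[i] << take) | (data[ptbyte] & (2**take - 1) )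
-- 				ptbit = ptbit - take
-- 				sizeOfBlock = sizeOfBlock - take
-- 			else:
-- 				take = min(sizeOfBlock, ptbit)
-- 				blockvalues[i] = (blockvalues[i] << take) | ((data[ptbyte] & ((2**take - 1) << (ptbit - take))) >> (ptbit - take) )
-- 				ptbit = ptbit - take
-- 				sizeOfBlock = sizeOfBlock - take
--
-- 	return blockvalues
-- ===== SOURCE B (Python) =====
-- def generateBlockValues(data, key):
--     # One flat bit cursor: block i takes key[i] >> 2 single bits, MSB-first.
--     out = []
--     pos = 0
--     for k in key:
--         s = k >> 2
--         v = 0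
--         if s > 0:
--             for p in range(pos, pos + s):
--                 v = (v << 1) | ((data[p // 8] >> (7 - p % 8)) & 1)
--             pos += s
--         out.append(v)
--     return out
-- ===== Notes on version B (the rewrite author's own statement) =====
-- stated objective: simpler
-- what changed: Replaces A's nested byte/chunk state machine (ptbyte/ptbit, up-to-8-bit chunk accumulation, preallocated list updated in place) with one flat bit cursor: each block is read MSB-first one bit at a time with the bit's byte and shift computed directly from the global bit offset, and the result list is built by append.
import Mathlib
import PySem

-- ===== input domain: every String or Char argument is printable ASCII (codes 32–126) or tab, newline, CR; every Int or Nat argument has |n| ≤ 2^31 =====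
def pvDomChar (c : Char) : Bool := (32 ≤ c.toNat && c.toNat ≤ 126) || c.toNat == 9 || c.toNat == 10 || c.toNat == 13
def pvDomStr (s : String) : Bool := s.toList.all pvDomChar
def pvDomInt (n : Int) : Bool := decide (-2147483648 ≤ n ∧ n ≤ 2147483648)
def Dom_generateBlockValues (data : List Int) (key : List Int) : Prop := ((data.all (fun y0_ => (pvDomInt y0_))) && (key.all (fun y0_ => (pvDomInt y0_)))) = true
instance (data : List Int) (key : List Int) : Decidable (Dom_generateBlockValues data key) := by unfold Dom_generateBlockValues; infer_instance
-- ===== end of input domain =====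

-- B replaces A's byte/chunk state machine with a single flat bit cursor (one bit per step); simpler, not faster.

-- ===== PORT A =====
-- Inner `while sizeOfBlock > 0` loop of A; fuel = sizeOfBlock.toNat bounds the
-- iteration count (each pass removes take ≥ 1 bits), so the loop always ends by
-- its own `s > 0` test, never by fuel.  data[ptbyte] is PySem.List.pyGetD with
-- default 0: Pre_ guarantees the index is in range (Python raises IndexError there).
-- `.toNat` on shift amounts: Python shift counts here are provably ≥ 0.
def pvAInner (data : List Int) : Nat → Int → Int → Int → Int → Int × Int × Int
  | 0, bv, _, ptbyte, ptbit => (bv, ptbyte, ptbit)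
  | fuel + 1, bv, s, ptbyte, ptbit =>
    if s > 0 then
      let ptbyte' := if ptbit = 0 then ptbyte + 1 else ptbyte
      let ptbit' := if ptbit = 0 then (8 : Int) else ptbit
      if ptbit' = 8 ∧ s > 8 then
        let take : Int := 8
        let bv' := PySem.Int.bor (bv <<< take.toNat)
          (PySem.Int.band (PySem.List.pyGetD data ptbyte' 0) (2 ^ take.toNat - 1))
        pvAInner data fuel bv' (s - take) ptbyte' (ptbit' - take)
      else
        let take : Int := min s ptbit'
        let bv' := PySem.Int.bor (bv <<< take.toNat)
          ((PySem.Int.band (PySem.List.pyGetD data ptbyte' 0)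
              (((2:Int) ^ take.toNat - 1) <<< (ptbit' - take).toNat)) >>> (ptbit' - take).toNat)
        pvAInner data fuel bv' (s - take) ptbyte' (ptbit' - take)
    else (bv, ptbyte, ptbit)

def generateBlockValues (data : List Int) (key : List Int) : List Int :=
  let init : List Int × Int × Int := (List.replicate key.length 0, 0, 8)
  let res := (List.range key.length).foldl (fun st i =>
    let blockConfig := PySem.List.pyGetD key (Int.ofNat i) 0
    let s := blockConfig >>> (2:Nat)
    let (v, ptbyte, ptbit) := pvAInner data s.toNat (st.1.getD i 0) s st.2.1 st.2.2
    (st.1.set i v, ptbyte, ptbit)) init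
  res.1

-- ===== PORT B =====
def pvBBit (data : List Int) (p : Int) : Int :=
  PySem.Int.band (PySem.List.pyGetD data (PySem.Int.floordiv p 8) 0 >>> (7 - PySem.Int.mod p 8).toNat) 1

def pvBBlock (data : List Int) (pos s : Int) : Int :=
  (PySem.List.pyRange pos (pos + s) 1).foldl
    (fun v p => PySem.Int.bor (v <<< (1:Nat)) (pvBBit data p)) 0

def pvBGo (data : List Int) : List Int → Int → List Int
  | [], _ => []
  | k :: rest, pos =>
    let s := k >>> (2:Nat)
    if s > 0 then pvBBlock data pos s :: pvBGo data rest (pos + s)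
    else 0 :: pvBGo data rest pos

def generateBlockValues_alt (data : List Int) (key : List Int) : List Int :=
  pvBGo data key 0

-- ===== PRECONDITION & SPEC =====
-- Pre_ excludes exactly the inputs on which the Python A raises IndexError
-- (the blocks request more bits than data holds); Python B raises there too.
def Pre_generateBlockValues (data : List Int) (key : List Int) : Prop :=
  (key.map (fun k : Int => max (k >>> (2:Nat)) 0)).sum ≤ 8 * (data.length : Int)
instance (data : List Int) (key : List Int) : Decidable (Pre_generateBlockValues data key) := by
  unfold Pre_generateBlockValues; infer_instance

def pvWitness_generateBlockValues : List Int × List Int := ([173, 46], [9, 3, 21])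

def Spec_generateBlockValues (data : List Int) (key : List Int) (out : List Int) : Prop := out = generateBlockValues_alt data key
instance (data : List Int) (key : List Int) (out : List Int) : Decidable (Spec_generateBlockValues data key out) := by unfold Spec_generateBlockValues; infer_instance

-- ===== CLAIM (what is proved, stated in full; the proofs are below) =====
def Claim_equal_generateBlockValues : Prop := ∀ (data : List Int) (key : List Int), Dom_generateBlockValues data key → Pre_generateBlockValues data key → Spec_generateBlockValues data key (generateBlockValues data key)

-- ===== LEMMAS AND PROOFS =====

lemma pvOrAddNat (a c t : Nat) (h : c < 2^t) : (a <<< t) ||| c = a * 2^t + c := by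
  apply Nat.eq_of_testBit_eq
  intro j
  rw [show a * 2^t + c = 2^t * a + c by ring, Nat.testBit_two_pow_mul_add a h j]
  simp only [Nat.testBit_or, Nat.testBit_shiftLeft]
  by_cases hj : j < t
  · simp [hj]
  · have hc : c.testBit j = false :=
      Nat.testBit_eq_false_of_lt (Nat.lt_of_lt_of_le h (Nat.pow_le_pow_right (by norm_num) (by omega)))
    simp [hj, (by omega : t ≤ j), hc]

lemma pvOrAddInt (a c : Int) (t : Nat) (ha : 0 ≤ a) (hc : 0 ≤ c) (h : c < 2^t) :
    PySem.Int.bor (a <<< t) c = a * 2^t + c := by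
  rw [Int.shiftLeft_eq]
  rw [PySem.Int.bor_of_nonneg (by positivity) hc]
  rw [Int.toNat_mul ha (by positivity)]
  have h2 : (2:Int)^t = ((2^t : Nat) : Int) := by push_cast; ring
  have hct : c.toNat < 2^t := by omega
  rw [show ((2:Int)^t).toNat = 2^t by rw [h2, Int.toNat_natCast]]
  rw [← Nat.shiftLeft_eq, pvOrAddNat _ _ _ hct]
  push_cast [Int.toNat_of_nonneg ha, Int.toNat_of_nonneg hc]
  ring

lemma pvMaskShiftNat (y t d : Nat) : ((2^t - 1) <<< d) &&& y = ((y >>> d) &&& (2^t - 1)) <<< d := by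
  apply Nat.eq_of_testBit_eq
  intro i
  by_cases h : d ≤ i
  · simp [Nat.testBit_and, Nat.testBit_shiftLeft, Nat.testBit_shiftRight, h,
      Nat.add_sub_cancel' h, Bool.and_comm]
  · simp [Nat.testBit_and, Nat.testBit_shiftLeft, h]

lemma pvNegDiv (u e : Int) (hu : 0 ≤ u) (he : 0 < e) :
    (-1 - u) / e = -1 - u / e ∧ (-1 - u) % e = e - 1 - u % e := by
  have h1 := Int.ediv_add_emod u e
  have h2 := Int.emod_nonneg u (by omega : e ≠ 0)
  have h3 := Int.emod_lt_of_pos u he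
  have := (Int.ediv_emod_unique (a := -1 - u) (b := e) (q := -1 - u / e) (r := e - 1 - u % e) he).mpr
    ⟨by ring_nf; omega, by omega, by omega⟩
  exact ⟨this.1, this.2⟩

lemma pvSplitMod (u e : Int) (he : 0 < e) : u % (2*e) = 2*((u/2) % e) + u % 2 := by
  have h1 := Int.ediv_add_emod u 2
  have h2 := Int.ediv_add_emod (u/2) e
  have h3 := Int.emod_nonneg (u/2) (by omega : e ≠ 0)
  have h4 := Int.emod_lt_of_pos (u/2) he
  have := (Int.ediv_emod_unique (a := u) (b := 2*e) (q := (u/2)/e) (r := 2*((u/2) % e) + u % 2)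
    (by omega)).mpr ⟨by ring_nf; omega, by omega, by omega⟩
  exact this.2

lemma pvBandMask (x : Int) (t d : Nat) :
    PySem.Int.band x (((2:Int)^t - 1) <<< d) >>> d = (x / 2^d) % 2^t := by
  have hM : ((2:Int)^t - 1) <<< d = ((((2^t - 1) <<< d : Nat)) : Int) := by
    rw [Int.shiftLeft_eq, Nat.shiftLeft_eq]
    push_cast [Nat.one_le_two_pow]
    ring
  have hcast : ∀ c : Nat, ((c <<< d : Nat) : Int) >>> d = (c : Int) := by
    intro c
    rw [Nat.shiftLeft_eq, Int.shiftRight_eq_div_pow]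
    push_cast
    rw [Int.mul_ediv_cancel _ (by positivity)]
  rcases le_or_gt 0 x with hx | hx
  · rw [hM, PySem.Int.band_of_nonneg hx (by positivity), Int.toNat_natCast]
    rw [Nat.land_comm, pvMaskShiftNat, hcast]
    rw [Nat.and_two_pow_sub_one_eq_mod, Nat.shiftRight_eq_div_pow]
    conv_rhs => rw [← Int.toNat_of_nonneg hx]
    push_cast
    ring_nf
  · have hy : x = -1 - ((-x-1).toNat : Int) := by omega
    set y : Nat := (-x-1).toNat with hydef
    have hband : PySem.Int.band x ((((2^t - 1) <<< d : Nat)) : Int)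
        = ((((2^t-1) <<< d) - (((2^t-1) <<< d) &&& y) : Nat) : Int) := by
      unfold PySem.Int.band
      rw [if_neg (by omega : ¬ (0:Int) ≤ x),
        if_pos (Int.natCast_nonneg _ : (0:Int) ≤ ((((2^t-1) <<< d : Nat)):Int))]
      rw [Int.toNat_natCast]
    rw [hM, hband, pvMaskShiftNat]
    set w : Nat := (y >>> d) &&& (2^t - 1) with hwdef
    have hw_le : w ≤ 2^t - 1 := Nat.and_le_right
    have hsub : ((2^t-1) <<< d) - (w <<< d) = (2^t - 1 - w) <<< d := by
      simp [Nat.shiftLeft_eq, Nat.sub_mul]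
    rw [hsub, hcast]
    have hwval : w = (y / 2^d) % 2^t := by
      rw [hwdef, Nat.and_two_pow_sub_one_eq_mod, Nat.shiftRight_eq_div_pow]
    have h1 : (-1 - (y:Int)) / 2^d = -1 - (y : Int) / 2^d :=
      (pvNegDiv y (2^d) (by positivity) (by positivity)).1
    have h2 : (-1 - (y : Int) / 2^d) % 2^t = 2^t - 1 - ((y:Int) / 2^d) % 2^t :=
      (pvNegDiv ((y:Int) / 2^d) (2^t) (Int.ediv_nonneg (by positivity) (by positivity))
        (by positivity)).2
    rw [hy, h1, h2]
    have hc2 : ((y:Int) / 2^d) % 2^t = ((y / 2^d % 2^t : Nat) : Int) := by push_cast; ring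
    rw [hc2, ← hwval]
    have h2t : (1:Nat) ≤ 2^t := Nat.one_le_two_pow
    have : ((2:Int)^t) = ((2^t : Nat) : Int) := by push_cast; ring
    rw [this]
    omega

lemma pvBandMod (x : Int) (t : Nat) : PySem.Int.band x ((2:Int)^t - 1) = x % 2^t := by
  have := pvBandMask x t 0
  rwa [Int.shiftLeft_zero, Int.shiftRight_zero, pow_zero, Int.ediv_one] at this

def pvBlockFold (data : List Int) (bv pos s : Int) : Int :=
  (PySem.List.pyRange pos (pos + s) 1).foldl
    (fun v p => PySem.Int.bor (v <<< (1:Nat)) (pvBBit data p)) bv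

lemma pvBBlock_eq (data : List Int) (pos s : Int) :
    pvBBlock data pos s = pvBlockFold data 0 pos s := rfl

lemma pvBlockFold_nonpos (data : List Int) (bv pos s : Int) (h : s ≤ 0) :
    pvBlockFold data bv pos s = bv := by
  simp [pvBlockFold, PySem.List.pyRange_one, (show s.toNat = 0 by omega)]

lemma pvBitEq (data : List Int) (pb r : Int) (hr : 0 ≤ r) (hr8 : r < 8) :
    pvBBit data (8*pb + r) = ((PySem.List.pyGetD data pb 0) / 2^(7 - r).toNat) % 2 := by
  unfold pvBBit
  have h1 : PySem.Int.floordiv (8*pb + r) 8 = pb := by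
    rw [PySem.Int.floordiv_eq_ediv_of_pos (by norm_num)]; omega
  have h2 : PySem.Int.mod (8*pb + r) 8 = r := by
    rw [PySem.Int.mod_eq_emod_of_pos (by norm_num)]; omega
  rw [h1, h2, PySem.Int.band_one, PySem.Int.mod_eq_emod_of_pos (by norm_num),
    Int.shiftRight_eq_div_pow]
  push_cast
  ring_nf

lemma pvRangeSplit (a m b : Int) (h1 : a ≤ m) (h2 : m ≤ b) :
    PySem.List.pyRange a b 1 = PySem.List.pyRange a m 1 ++ PySem.List.pyRange m b 1 := by
  rw [PySem.List.pyRange_one, PySem.List.pyRange_one, PySem.List.pyRange_one]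
  rw [show (b - a).toNat = (m - a).toNat + (b - m).toNat by omega]
  rw [List.range_add, List.map_append, List.map_map]
  congr 1
  apply List.map_congr_left
  intro k _
  simp only [Function.comp_apply]
  omega

lemma pvChunkFold (data : List Int) (pb : Int) :
    ∀ (t : Nat) (pt bv : Int), 0 ≤ bv → (t:Int) ≤ pt → pt ≤ 8 →
    pvBlockFold data bv (8*pb + 8 - pt) t =
      bv * 2^t + ((PySem.List.pyGetD data pb 0) / 2^(pt - t).toNat) % 2^t := by
  intro t
  induction t with
  | zero =>
    intro pt bv hbv _ _
    rw [pvBlockFold_nonpos data bv _ _ (by omega)]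
    simp [Int.emod_one]
  | succ t ih =>
    intro pt bv hbv hle h8
    set x := PySem.List.pyGetD data pb 0 with hx
    set a : Int := 8*pb + 8 - pt with ha
    have hsplit : PySem.List.pyRange a (a + (t+1:Nat)) 1
        = PySem.List.pyRange a (a + t) 1 ++ PySem.List.pyRange (a + t) (a + (t+1:Nat)) 1 := by
      have := pvRangeSplit a (a + t) (a + (t+1:Nat)) (by omega) (by push_cast; omega)
      exact this
    have hone : PySem.List.pyRange (a + t) (a + (t+1:Nat)) 1 = [a + t] := by
      rw [PySem.List.pyRange_one, show ((a + (t+1:Nat)) - (a + t)).toNat = 1 by push_cast; omega]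
      simp
    unfold pvBlockFold
    rw [hsplit, List.foldl_append, hone]
    have hmid : (PySem.List.pyRange a (a + t) 1).foldl
        (fun v p => PySem.Int.bor (v <<< (1:Nat)) (pvBBit data p)) bv
        = bv * 2^t + (x / 2^(pt - t).toNat) % 2^t := by
      have := ih pt bv hbv (by omega) h8
      unfold pvBlockFold at this
      exact this
    rw [hmid]
    have hv0 : (0:Int) ≤ bv * 2^t + (x / 2^(pt - t).toNat) % 2^t := by
      have := Int.emod_nonneg (x / 2^(pt - t).toNat) (by positivity : ((2:Int)^t) ≠ 0)
      positivity
    have hbit : pvBBit data (a + t) = (x / 2^(pt - (t+1:Nat)).toNat) % 2 := by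
      have : a + t = 8*pb + (8 - pt + t) := by push_cast; omega
      rw [this, pvBitEq data pb _ (by omega) (by omega)]
      rw [show (7 - (8 - pt + t)).toNat = (pt - (t+1:Nat)).toNat by push_cast; omega]
    simp only [List.foldl_cons, List.foldl_nil]
    rw [hbit]
    have hb0 := Int.emod_nonneg (x / 2^(pt - (t+1:Nat)).toNat) (by norm_num : (2:Int) ≠ 0)
    have hb2 := Int.emod_lt_of_pos (x / 2^(pt - (t+1:Nat)).toNat) (by norm_num : (0:Int) < 2)
    have horb := pvOrAddInt (bv * 2^t + (x / 2^(pt - (t:Int)).toNat) % 2^t)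
      ((x / 2^(pt - ((t:Int)+1)).toNat) % 2) 1 hv0 hb0 (by simpa using hb2)
    push_cast at horb ⊢
    rw [horb]
    -- arithmetic recombination
    have hdd : x / 2^(pt - (t+1:Nat)).toNat / 2 = x / 2^(pt - t).toNat := by
      rw [Int.ediv_ediv_of_nonneg (by positivity)]
      rw [show ((2:Int)^(pt - (t+1:Nat)).toNat * 2) = 2^(pt - t).toNat by
        rw [← pow_succ]
        congr 1
        push_cast
        omega]
    have hsm := pvSplitMod (x / 2^(pt - (t+1:Nat)).toNat) (2^t) (by positivity)
    rw [hdd] at hsm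
    push_cast at hsm
    rw [show ((2:Int)^(t+1:Nat)) = 2*2^t by ring]
    rw [hsm]
    ring

lemma pvChunkAbs (data : List Int) (pb1 pt1 bv s : Int) (t : Nat)
    (_hpb : 0 ≤ pb1) (ht1 : 1 ≤ (t:Int)) (htp : (t:Int) ≤ pt1) (hp8 : pt1 ≤ 8)
    (hts : (t:Int) ≤ s) (hbv : 0 ≤ bv) :
    pvBlockFold data bv (8*pb1 + 8 - pt1) s
      = pvBlockFold data
          (bv * 2^t + ((PySem.List.pyGetD data pb1 0) / 2^(pt1 - t).toNat) % 2^t)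
          (8*pb1 + 8 - pt1 + t) (s - t) := by
  set pos : Int := 8*pb1 + 8 - pt1 with hpos
  unfold pvBlockFold
  rw [pvRangeSplit pos (pos + t) (pos + s) (by omega) (by omega)]
  rw [List.foldl_append]
  have hchunk := pvChunkFold data pb1 t pt1 bv hbv htp hp8
  unfold pvBlockFold at hchunk
  rw [hchunk]
  have harg : 8*pb1 + 8 - pt1 + (t:Int) + (s - (t:Int)) = pos + s := by omega
  rw [harg]

lemma pvInnerEq (data : List Int) :
    ∀ (fuel : Nat) (bv s pb pt : Int), 0 ≤ bv → 0 ≤ pb → 0 ≤ pt → pt ≤ 8 → s.toNat ≤ fuel →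
    ∃ pb' pt', pvAInner data fuel bv s pb pt = (pvBlockFold data bv (8*pb + 8 - pt) s, pb', pt')
      ∧ 0 ≤ pb' ∧ 0 ≤ pt' ∧ pt' ≤ 8 ∧ 8*pb' + 8 - pt' = 8*pb + 8 - pt + max s 0 := by
  intro fuel
  induction fuel with
  | zero =>
    intro bv s pb pt hbv hpb hpt hpt8 hfuel
    refine ⟨pb, pt, ?_, hpb, hpt, hpt8, by omega⟩
    rw [pvBlockFold_nonpos data bv _ _ (by omega)]
    rfl
  | succ fuel ih =>
    intro bv s pb pt hbv hpb hpt hpt8 hfuel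
    by_cases hs : s > 0
    · set pb1 : Int := if pt = 0 then pb + 1 else pb with hpb1
      set x := PySem.List.pyGetD data pb1 0 with hx
      set pt1 : Int := if pt = 0 then (8:Int) else pt with hpt1
      have hpb1nn : 0 ≤ pb1 := by rw [hpb1]; split <;> omega
      have hpt1b : 1 ≤ pt1 ∧ pt1 ≤ 8 := by rw [hpt1]; split <;> omega
      have hposeq : 8*pb1 + 8 - pt1 = 8*pb + 8 - pt := by
        rw [hpb1, hpt1]; split_ifs <;> omega
      have hstep : pvAInner data (fuel+1) bv s pb pt
          = if pt1 = 8 ∧ s > 8 then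
              pvAInner data fuel
                (PySem.Int.bor (bv <<< (8:Int).toNat)
                  (PySem.Int.band (PySem.List.pyGetD data pb1 0) (2 ^ (8:Int).toNat - 1)))
                (s - 8) pb1 (pt1 - 8)
            else
              pvAInner data fuel
                (PySem.Int.bor (bv <<< (min s pt1).toNat)
                  ((PySem.Int.band (PySem.List.pyGetD data pb1 0)
                      (((2:Int) ^ (min s pt1).toNat - 1) <<< (pt1 - min s pt1).toNat))
                    >>> (pt1 - min s pt1).toNat))
                (s - min s pt1) pb1 (pt1 - min s pt1) := by
        rw [pvAInner]
        rw [if_pos hs]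
      rw [hstep]
      by_cases hbr : pt1 = 8 ∧ s > 8
      · rw [if_pos hbr]
        have hc0 := Int.emod_nonneg x (by positivity : ((2:Int)^8) ≠ 0)
        have hc1 := Int.emod_lt_of_pos x (by positivity : (0:Int) < (2:Int)^8)
        have hbv' : PySem.Int.bor (bv <<< (8:Int).toNat)
            (PySem.Int.band x (2 ^ (8:Int).toNat - 1)) = bv * 2^8 + x % 2^8 := by
          rw [show (8:Int).toNat = 8 from rfl, pvBandMod x 8]
          exact pvOrAddInt bv (x % 2^8) 8 hbv hc0 hc1
        rw [hbv']
        obtain ⟨pb', pt', heq, h1, h2, h3, h4⟩ :=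
          ih (bv * 2^8 + x % 2^8) (s - 8) pb1 (pt1 - 8)
            (by omega) hpb1nn (by omega) (by omega) (by omega)
        refine ⟨pb', pt', ?_, h1, h2, h3, by omega⟩
        rw [heq]
        have habs := pvChunkAbs data pb1 pt1 bv s 8 hpb1nn (by omega) (by omega) (by omega)
          (by omega) hbv
        have hch : bv * 2^(8:Nat) + (x / 2^(pt1 - (8:Nat)).toNat) % 2^(8:Nat)
            = bv * 2^8 + x % 2^8 := by
          rw [show (pt1 - ((8:Nat):Int)).toNat = 0 by omega]
          norm_num
        rw [hch] at habs
        rw [← hposeq, habs]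
        have : 8*pb1 + 8 - pt1 + ((8:Nat):Int) = 8*pb1 + 8 - (pt1 - 8) := by push_cast; omega
        rw [this]
        norm_num
      · rw [if_neg hbr]
        set t : Int := min s pt1 with htdef
        have ht1 : 1 ≤ t := by omega
        have htp : t ≤ pt1 := by omega
        have hts : t ≤ s := by omega
        have htn : ((t.toNat : Int)) = t := by omega
        have hd0 := Int.emod_nonneg (x / 2^(pt1 - t).toNat) (by positivity : ((2:Int)^t.toNat) ≠ 0)
        have hd1 := Int.emod_lt_of_pos (x / 2^(pt1 - t).toNat) (by positivity : (0:Int) < (2:Int)^t.toNat)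
        have hbv' : PySem.Int.bor (bv <<< t.toNat)
            ((PySem.Int.band x (((2:Int) ^ t.toNat - 1) <<< (pt1 - t).toNat)) >>> (pt1 - t).toNat)
            = bv * 2^t.toNat + (x / 2^(pt1 - t).toNat) % 2^t.toNat := by
          rw [pvBandMask x t.toNat (pt1 - t).toNat]
          exact pvOrAddInt bv _ t.toNat hbv hd0 hd1
        rw [hbv']
        obtain ⟨pb', pt', heq, h1, h2, h3, h4⟩ :=
          ih (bv * 2^t.toNat + (x / 2^(pt1 - t).toNat) % 2^t.toNat) (s - t) pb1 (pt1 - t)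
            (by positivity) hpb1nn (by omega) (by omega) (by omega)
        refine ⟨pb', pt', ?_, h1, h2, h3, by omega⟩
        rw [heq]
        have habs := pvChunkAbs data pb1 pt1 bv s t.toNat hpb1nn (by omega) (by omega) (by omega)
          (by omega) hbv
        rw [htn] at habs
        rw [← hposeq, habs]
        have : 8*pb1 + 8 - pt1 + t = 8*pb1 + 8 - (pt1 - t) := by omega
        rw [this]
    · refine ⟨pb, pt, ?_, hpb, hpt, hpt8, by omega⟩
      rw [pvBlockFold_nonpos data bv _ _ (by omega)]
      rw [pvAInner, if_neg hs]

def pvAOuterSt (data : List Int) : List Int → Int → Int → List Int × Int × Int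
  | [], pb, pt => ([], pb, pt)
  | k :: rest, pb, pt =>
    let s := k >>> (2:Nat)
    let r := pvAInner data s.toNat 0 s pb pt
    let rest' := pvAOuterSt data rest r.2.1 r.2.2
    (r.1 :: rest'.1, rest'.2)

lemma pvBridgeAux (data key : List Int) :
    ∀ (rest : List Int) (i : Nat) (bvs : List Int) (pb pt : Int),
    i + rest.length = key.length → key.drop i = rest → bvs.length = key.length →
    (∀ j : Nat, i ≤ j → bvs.getD j 0 = 0) →
    (List.range' i rest.length).foldl (fun st i =>
      let blockConfig := PySem.List.pyGetD key (Int.ofNat i) 0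
      let s := blockConfig >>> (2:Nat)
      let (v, ptbyte, ptbit) := pvAInner data s.toNat (st.1.getD i 0) s st.2.1 st.2.2
      (st.1.set i v, ptbyte, ptbit)) (bvs, pb, pt)
    = (bvs.take i ++ (pvAOuterSt data rest pb pt).1, (pvAOuterSt data rest pb pt).2) := by
  intro rest
  induction rest with
  | nil =>
    intro i bvs pb pt hlen hdrop hblen hzero
    simp only [List.length_nil, List.range'_zero, List.foldl_nil, pvAOuterSt]
    rw [List.take_of_length_le (by simp at hlen; omega)]
    simp
  | cons k rest' ihr =>
    intro i bvs pb pt hlen hdrop hblen hzero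
    have hik : key[i]? = some k := by
      have h0 : (key.drop i)[0]? = some k := by rw [hdrop]; rfl
      rwa [List.getElem?_drop, Nat.add_zero] at h0
    have hkey : PySem.List.pyGetD key (Int.ofNat i) 0 = k := by
      rw [show (Int.ofNat i) = ((i:Nat):Int) from rfl, PySem.List.pyGetD_natCast,
        List.getD_eq_getElem?_getD, hik]
      rfl
    have hbv0 : bvs.getD i 0 = 0 := hzero i (by omega)
    simp only [List.length_cons, List.range'_succ, List.foldl_cons]
    rw [hkey, hbv0]
    set s : Int := k >>> (2:Nat) with hsdef
    set r := pvAInner data s.toNat 0 s pb pt with hrdef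
    have hstep : (fun (st : List Int × Int × Int) (i : Nat) =>
        let blockConfig := PySem.List.pyGetD key (Int.ofNat i) 0
        let s := blockConfig >>> (2:Nat)
        let (v, ptbyte, ptbit) := pvAInner data s.toNat (st.1.getD i 0) s st.2.1 st.2.2
        (st.1.set i v, ptbyte, ptbit)) = (fun st i =>
          let blockConfig := PySem.List.pyGetD key (Int.ofNat i) 0
          let s := blockConfig >>> (2:Nat)
          ((st.1.set i (pvAInner data s.toNat (st.1.getD i 0) s st.2.1 st.2.2).1),
            (pvAInner data s.toNat (st.1.getD i 0) s st.2.1 st.2.2).2)) := by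
      funext st j
      rfl
    rw [hstep]
    have hlen' : i < bvs.length := by
      simp only [List.length_cons] at hlen
      omega
    have ihres := ihr (i+1) (bvs.set i r.1) r.2.1 r.2.2
      (by simp only [List.length_cons] at hlen; omega)
      (by rw [List.drop_add_one_eq_tail_drop, hdrop]; rfl)
      (by rw [List.length_set]; exact hblen)
      (by
        intro j hj
        rw [List.getD_eq_getElem?_getD, List.getElem?_set_ne (by omega : i ≠ j),
          ← List.getD_eq_getElem?_getD]
        exact hzero j (by omega))
    rw [ihres]
    have htake : (bvs.set i r.1).take (i+1) = bvs.take i ++ [r.1] := by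
      rw [List.set_eq_take_append_cons_drop, if_pos hlen', List.take_append]
      rw [List.take_of_length_le (by rw [List.length_take]; omega)]
      rw [List.length_take, show i + 1 - min i bvs.length = 1 by omega]
      rfl
    rw [htake]
    show _ = (bvs.take i ++ (pvAOuterSt data (k :: rest') pb pt).1,
      (pvAOuterSt data (k :: rest') pb pt).2)
    simp only [pvAOuterSt]
    rw [← hsdef, ← hrdef]
    simp

lemma pvOuterBGo (data : List Int) : ∀ (key : List Int) (pb pt : Int),
    0 ≤ pb → 0 ≤ pt → pt ≤ 8 →
    (pvAOuterSt data key pb pt).1 = pvBGo data key (8*pb + 8 - pt) := by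
  intro key
  induction key with
  | nil => intro pb pt _ _ _; rfl
  | cons k rest ih =>
    intro pb pt hpb hpt hpt8
    set s : Int := k >>> (2:Nat) with hsdef
    obtain ⟨pb', pt', heq, h1, h2, h3, h4⟩ :=
      pvInnerEq data s.toNat 0 s pb pt le_rfl hpb hpt hpt8 le_rfl
    simp only [pvAOuterSt, pvBGo, ← hsdef]
    rw [heq]
    by_cases hs : s > 0
    · rw [if_pos hs]
      simp only []
      rw [pvBBlock_eq, ih pb' pt' h1 h2 h3,
        show 8*pb' + 8 - pt' = 8*pb + 8 - pt + s by omega]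
    · rw [if_neg hs]
      simp only []
      rw [pvBlockFold_nonpos data 0 _ _ (by omega), ih pb' pt' h1 h2 h3,
        show 8*pb' + 8 - pt' = 8*pb + 8 - pt by omega]

lemma pvMainEq (data key : List Int) :
    generateBlockValues data key = generateBlockValues_alt data key := by
  have hzero : ∀ j : Nat, (0:Nat) ≤ j → (List.replicate key.length (0:Int)).getD j 0 = 0 := by
    intro j _
    rw [List.getD_eq_getElem?_getD]
    by_cases h : j < key.length
    · simp [List.getElem?_replicate, h]
    · simp [List.getElem?_replicate, h]
  have hb := pvBridgeAux data key key 0 (List.replicate key.length 0) 0 8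
    (by simp) (by simp) (by simp) hzero
  unfold generateBlockValues
  simp only []
  rw [List.range_eq_range', hb]
  simp only [List.take_zero, List.nil_append]
  rw [pvOuterBGo data key 0 8 le_rfl (by norm_num) (by norm_num)]
  norm_num
  rfl

-- ===== VERDICT (by name: the statement is the Claim_ definition above) =====
theorem generateBlockValues_spec : Claim_equal_generateBlockValues := by
  unfold Claim_equal_generateBlockValues
  intro data key _ _
  unfold Spec_generateBlockValues
  exact pvMainEq data key
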